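-- pv_equiv track=rewrite | github.com/totoberni/RGCI | src/evaluation/eval_utils.py | validate_ce_path
-- ===== SOURCE A (Python) =====
-- def validate_ce_path(name_list, c2e_path, extracted_answer):
--     ans_path = extracted_answer.split('\n')
--     ans_path_flat = []
--     for p in ans_path:
--         try:
--             ans_path_flat.append([name_list.index(s.strip().lower()) for s in p.split('->')])
--         except:
--             pass
--
--     c2e_path_flat = []
--     for i in c2e_path:
--         for p in i:
--             c2e_path_flat.append(p)
--     if sorted(ans_path_flat) == sorted(c2e_path_flat):
--         result = True
--     else:
--         result = False
--
--     return result
-- ===== SOURCE B (Python) =====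
-- def validate_ce_path(name_list, c2e_path, extracted_answer):
--     # first-occurrence index map replaces repeated list.index scans;
--     # multiset equality via count dictionaries replaces sort-and-compare
--     pos = {}
--     for i, name in enumerate(name_list):
--         if name not in pos:
--             pos[name] = i
--     ans_counts = {}
--     for line in extracted_answer.split('\n'):
--         idxs = []
--         ok = True
--         for s in line.split('->'):
--             j = pos.get(s.strip().lower())
--             if j is None:
--                 ok = False
--                 break
--             idxs.append(j)
--         if ok:
--             t = tuple(idxs)
--             ans_counts[t] = ans_counts.get(t, 0) + 1
--     exp_counts = {}
--     for group in c2e_path: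
--         for p in group:
--             t = tuple(p)
--             exp_counts[t] = exp_counts.get(t, 0) + 1
--     return ans_counts == exp_counts
-- ===== Notes on version B (the rewrite author's own statement) =====
-- stated objective: alternative
-- what changed: B builds a first-occurrence name->index dictionary once instead of calling name_list.index per token, and decides multiset equality of the paths by comparing count dictionaries instead of sorting both flattened lists and comparing.
import Mathlib
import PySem

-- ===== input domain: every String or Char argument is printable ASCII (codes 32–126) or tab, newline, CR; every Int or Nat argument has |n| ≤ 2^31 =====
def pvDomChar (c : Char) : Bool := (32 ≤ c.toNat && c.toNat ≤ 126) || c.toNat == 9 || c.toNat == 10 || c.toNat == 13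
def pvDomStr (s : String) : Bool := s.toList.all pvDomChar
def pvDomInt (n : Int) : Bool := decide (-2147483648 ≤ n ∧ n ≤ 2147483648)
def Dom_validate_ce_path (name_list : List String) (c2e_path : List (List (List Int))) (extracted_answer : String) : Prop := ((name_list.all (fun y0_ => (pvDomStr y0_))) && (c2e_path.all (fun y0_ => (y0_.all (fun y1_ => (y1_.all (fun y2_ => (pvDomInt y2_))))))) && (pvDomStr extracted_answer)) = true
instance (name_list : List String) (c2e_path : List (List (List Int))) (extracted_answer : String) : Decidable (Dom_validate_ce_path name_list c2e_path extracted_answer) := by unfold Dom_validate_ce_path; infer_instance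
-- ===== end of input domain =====

-- B replaces A's repeated list.index scans by a first-occurrence index dictionary and the
-- sort-and-compare by multiset equality of count dictionaries (same return value everywhere).

-- ===== PORT A =====
-- s.split(sep) for a nonempty literal sep (split? is none only for sep = "")
def pvSplit (s sep : String) : List String := (PySem.Str.split? s sep).getD []

-- s.strip().lower()
def pvKey (s : String) : String := PySem.Str.lower (PySem.Str.strip s)

-- sorted(xs) on lists of int lists (Python's lexicographic list order = the List linear order)
def pvSortedLL (xs : List (List Int)) : List (List Int) :=
  @PySem.List.sorted _ _ List.instLinearOrder.toLT LinearOrder.toDecidableLT xs (fun x => x) false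

-- [name_list.index(s.strip().lower()) for s in p.split('->')]; the try/except around the
-- append is the Option: `none` = ValueError from .index, and then nothing is appended.
def pvParseLine (name_list : List String) (p : String) : Option (List Int) :=
  (pvSplit p "->").mapM
    (fun s => (PySem.List.index? name_list (pvKey s)).map (fun (j : Nat) => (j : Int)))

def validate_ce_path (name_list : List String) (c2e_path : List (List (List Int))) (extracted_answer : String) : Bool :=
  let ans_path := pvSplit extracted_answer "\n"
  let ans_path_flat := ans_path.foldl (fun acc p =>
      match pvParseLine name_list p with
      | some l => acc ++ [l]
      | none => acc) ([] : List (List Int))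
  let c2e_path_flat := c2e_path.foldl (fun acc i => i.foldl (fun acc p => acc ++ [p]) acc) ([] : List (List Int))
  if pvSortedLL ans_path_flat == pvSortedLL c2e_path_flat then true else false

-- ===== PORT B =====
-- pos = {}; for i, name in enumerate(name_list): if name not in pos: pos[name] = i
def pvBuildPos (name_list : List String) : PySem.Dict String Int :=
  (PySem.List.enumerate name_list 0).foldl
    (fun d p => if d.contains p.2 then d else d.insert p.2 p.1) PySem.Dict.empty

-- the inner `for s in line.split('->')` loop with its ok-flag and break
def pvLineLoop (pos : PySem.Dict String Int) : List String → List Int → List Int × Bool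
  | [], idxs => (idxs, true)
  | s :: rest, idxs =>
    match pos.get? (pvKey s) with
    | none => (idxs, false)
    | some j => pvLineLoop pos rest (idxs ++ [j])

-- Python's dict == (order-insensitive): same key set, same value at every key
def pvDictEq (a b : PySem.Dict (List Int) Int) : Bool :=
  a.items.all (fun p => b.get? p.1 == some p.2) && b.items.all (fun p => a.contains p.1)

def validate_ce_path_alt (name_list : List String) (c2e_path : List (List (List Int))) (extracted_answer : String) : Bool :=
  let pos := pvBuildPos name_list
  let ans_counts := (pvSplit extracted_answer "\n").foldl
    (fun d line =>
      let r := pvLineLoop pos (pvSplit line "->") []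
      if r.2 then d.insert r.1 (d.getD r.1 0 + 1) else d)
    PySem.Dict.empty
  let exp_counts := c2e_path.foldl
    (fun d grp => grp.foldl (fun d p => d.insert p (d.getD p 0 + 1)) d)
    PySem.Dict.empty
  pvDictEq ans_counts exp_counts

-- ===== PRECONDITION & SPEC =====
def Spec_validate_ce_path (name_list : List String) (c2e_path : List (List (List Int))) (extracted_answer : String) (out : Bool) : Prop := out = validate_ce_path_alt name_list c2e_path extracted_answer
instance (name_list : List String) (c2e_path : List (List (List Int))) (extracted_answer : String) (out : Bool) : Decidable (Spec_validate_ce_path name_list c2e_path extracted_answer out) := by unfold Spec_validate_ce_path; infer_instance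

-- ===== CLAIM (what is proved, stated in full; the proofs are below) =====
def Claim_equal_validate_ce_path : Prop := ∀ (name_list : List String) (c2e_path : List (List (List Int))) (extracted_answer : String), Dom_validate_ce_path name_list c2e_path extracted_answer → Spec_validate_ce_path name_list c2e_path extracted_answer (validate_ce_path name_list c2e_path extracted_answer)

-- ===== LEMMAS AND PROOFS =====

theorem pv_get?_none_of_not_contains {κ ν : Type} [BEq κ] (d : PySem.Dict κ ν) (k : κ)
    (h : d.contains k = false) : d.get? k = none := by
  cases hq : d.get? k with
  | none => rfl
  | some v => rw [PySem.Dict.contains_eq_isSome_get?, hq] at h; simp at h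

-- the first-occurrence dictionary looks up exactly list.index
theorem pv_get?_buildPos_gen (x : String) :
    ∀ (nl : List String) (s : Int) (d : PySem.Dict String Int),
    ((PySem.List.enumerate nl s).foldl
        (fun d p => if d.contains p.2 then d else d.insert p.2 p.1) d).get? x
    = if d.contains x then d.get? x
      else (PySem.List.index? nl x).map (fun (j : Nat) => s + (j : Int)) := by
  intro nl
  induction nl with
  | nil =>
    intro s d
    simp only [PySem.List.enumerate_nil, List.foldl_nil]
    by_cases hc : d.contains x
    · simp [hc]
    · simp only [hc, Bool.false_eq_true, if_false]
      rw [pv_get?_none_of_not_contains d x (by simpa using hc)]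
      simp [PySem.List.index?]
  | cons n t ih =>
    intro s d
    rw [PySem.List.enumerate_cons, List.foldl_cons]
    by_cases hxn : x = n
    · subst hxn
      by_cases hc : d.contains x
      · rw [if_pos hc, ih, if_pos hc, if_pos hc]
      · rw [if_neg (by simpa using hc), ih,
          if_pos (PySem.Dict.contains_insert_self d x s),
          if_neg (by simpa using hc),
          PySem.Dict.get?_insert_self, PySem.List.index?_cons_self]
        simp
    · have hne : n ≠ x := fun h => hxn h.symm
      rw [PySem.List.index?_cons_of_ne t hne, Option.map_map]
      by_cases hcn : d.contains n
      · rw [if_pos hcn, ih]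
        by_cases hc : d.contains x
        · rw [if_pos hc, if_pos hc]
        · rw [if_neg (by simpa using hc), if_neg (by simpa using hc)]
          cases PySem.List.index? t x <;> simp [Function.comp] <;> ring
      · rw [if_neg (by simpa using hcn), ih]
        have hcx : (d.insert n s).contains x = d.contains x := by
          rw [PySem.Dict.contains_insert]
          simp [show (x == n) = false by simpa using hxn]
        rw [hcx]
        by_cases hc : d.contains x
        · rw [if_pos hc, if_pos hc, PySem.Dict.get?_insert_of_ne d s hxn]
        · rw [if_neg (by simpa using hc), if_neg (by simpa using hc)]
          cases PySem.List.index? t x <;> simp [Function.comp] <;> ring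

theorem pv_get?_buildPos (nl : List String) (x : String) :
    (pvBuildPos nl).get? x = (PySem.List.index? nl x).map (fun (j : Nat) => (j : Int)) := by
  unfold pvBuildPos
  rw [pv_get?_buildPos_gen x nl 0 PySem.Dict.empty]
  rw [if_neg (by simp [PySem.Dict.contains_empty])]
  cases PySem.List.index? nl x <;> simp

-- the ok-flag loop agrees with the Option-valued comprehension
theorem pv_lineLoop_some (pos : PySem.Dict String Int) :
    ∀ (toks : List String) (l idxs : List Int),
    toks.mapM (fun s => pos.get? (pvKey s)) = some l →
    pvLineLoop pos toks idxs = (idxs ++ l, true) := by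
  intro toks
  induction toks with
  | nil => intro l idxs h; simp at h; simp [pvLineLoop, ← h]
  | cons s t ih =>
    intro l idxs h
    simp only [List.mapM_cons] at h
    cases hg : pos.get? (pvKey s) with
    | none => simp [hg] at h
    | some j =>
      simp [hg] at h
      obtain ⟨l', hl', rfl⟩ : ∃ l', List.mapM (fun s => pos.get? (pvKey s)) t = some l' ∧ l = j :: l' := by
        cases hm : List.mapM (fun s => pos.get? (pvKey s)) t with
        | none => rw [hm] at h; simp at h
        | some l' => rw [hm] at h; simp at h; exact ⟨l', rfl, h.symm⟩
      rw [show idxs ++ j :: l' = (idxs ++ [j]) ++ l' by simp]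
      simp [pvLineLoop, hg, ih l' (idxs ++ [j]) hl']

theorem pv_lineLoop_none (pos : PySem.Dict String Int) :
    ∀ (toks : List String) (idxs : List Int),
    toks.mapM (fun s => pos.get? (pvKey s)) = none →
    (pvLineLoop pos toks idxs).2 = false := by
  intro toks
  induction toks with
  | nil => intro idxs h; simp at h
  | cons s t ih =>
    intro idxs h
    simp only [List.mapM_cons] at h
    cases hg : pos.get? (pvKey s) with
    | none => simp [pvLineLoop, hg]
    | some j =>
      simp [hg] at h
      have hm : List.mapM (fun s => pos.get? (pvKey s)) t = none := by
        cases hm : List.mapM (fun s => pos.get? (pvKey s)) t with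
        | none => rfl
        | some l' => exact absurd hm (h l')
      simp [pvLineLoop, hg, ih _ hm]

-- a fold that skips `none` lines = collect-the-somes first, then fold
theorem pv_fold_extract {β σ : Type} (g : β → Option (List Int)) (f : σ → List Int → σ)
    (F : List (List Int) → β → List (List Int)) (G : σ → β → σ)
    (hF : ∀ a p, F a p = ((g p).map (fun l => a ++ [l])).getD a)
    (hG : ∀ d p, G d p = ((g p).map (f d)).getD d) :
    ∀ (ls : List β) (acc : List (List Int)) (d : σ),
    (ls.foldl F acc).foldl f d = ls.foldl G (acc.foldl f d) := by
  intro ls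
  induction ls with
  | nil => intro acc d; simp
  | cons p t ih =>
    intro acc d
    simp only [List.foldl_cons]
    rw [ih, hF, hG]
    cases hg : g p with
    | some l => simp [List.foldl_append]
    | none => simp

theorem pv_foldl_append {α : Type} (l : List (List α)) :
    ∀ acc : List α, l.foldl (fun a i => a ++ i) acc = acc ++ l.flatten := by
  induction l with
  | nil => simp
  | cons i t ih => intro acc; simp [List.foldl_cons, ih]

-- A's double append loop builds the flatten
theorem pv_c2e_flat (c2e : List (List (List Int))) :
    c2e.foldl (fun acc i => i.foldl (fun acc p => acc ++ [p]) acc) ([] : List (List Int))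
    = c2e.flatten := by
  have h : (fun (acc : List (List Int)) (i : List (List Int)) => i.foldl (fun acc p => acc ++ [p]) acc)
      = fun acc i => acc ++ i := by
    funext acc i; exact PySem.List.foldl_append_singleton i acc
  rw [h, pv_foldl_append]; simp

theorem pv_nested_foldl {α σ : Type} (f : σ → α → σ) (l : List (List α)) :
    ∀ d : σ, l.foldl (fun d grp => grp.foldl f d) d = (l.flatten).foldl f d := by
  induction l with
  | nil => intro d; simp
  | cons g t ih => intro d; simp [List.foldl_cons, List.flatten_cons, List.foldl_append, ih]

-- B's nested counting loop = Counter of the flatten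
theorem pv_exp_counter (c2e : List (List (List Int))) :
    c2e.foldl (fun d grp => grp.foldl (fun d p => d.insert p (d.getD p 0 + 1)) d)
      PySem.Dict.empty
    = PySem.Dict.counter c2e.flatten := by
  rw [pv_nested_foldl, PySem.Dict.foldl_insert_getD_add_one_eq_counter]

theorem pv_get?_counter (xs : List (List Int)) (k : List Int) :
    (PySem.Dict.counter xs).get? k
    = if k ∈ xs then some ((xs.count k : Int)) else none := by
  by_cases h : k ∈ xs
  · rw [if_pos h]
    refine PySem.Dict.get?_of_mem_items _ ?_ (PySem.Dict.nodup_keys_counter xs)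
    rw [PySem.Dict.items_counter]
    exact List.mem_map.mpr ⟨k, (PySem.Set.mem_ofList xs k).mpr h, rfl⟩
  · rw [if_neg h, PySem.Dict.get?_eq_none_iff_not_mem_keys]
    rw [PySem.Dict.keys_counter]
    exact fun hm => h ((PySem.Set.mem_ofList xs k).mp hm)

-- Counter(xs) == Counter(ys) ↔ xs and ys are equal as multisets
theorem pv_dictEq_counter (xs ys : List (List Int)) :
    pvDictEq (PySem.Dict.counter xs) (PySem.Dict.counter ys) = true ↔ xs.Perm ys := by
  unfold pvDictEq
  rw [Bool.and_eq_true, List.all_eq_true, List.all_eq_true]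
  constructor
  · rintro ⟨h1, h2⟩
    rw [List.perm_iff_count]
    intro a
    by_cases ha : a ∈ xs
    · have := h1 (a, (xs.count a : Int)) (by
        rw [PySem.Dict.items_counter]
        exact List.mem_map.mpr ⟨a, (PySem.Set.mem_ofList xs a).mpr ha, rfl⟩)
      rw [beq_iff_eq, pv_get?_counter] at this
      simp only at this
      by_cases hay : a ∈ ys
      · rw [if_pos hay] at this
        have := Option.some_injective _ this
        exact_mod_cast this.symm
      · rw [if_neg hay] at this; simp at this
    · by_cases hay : a ∈ ys
      · have := h2 (a, (ys.count a : Int)) (by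
          rw [PySem.Dict.items_counter]
          exact List.mem_map.mpr ⟨a, (PySem.Set.mem_ofList ys a).mpr hay, rfl⟩)
        rw [PySem.Dict.contains_counter] at this
        exact absurd (by simpa using this) ha
      · rw [List.count_eq_zero.mpr ha, List.count_eq_zero.mpr hay]
  · intro hp
    have hc := List.perm_iff_count.mp hp
    constructor
    · intro p hp'
      rw [PySem.Dict.items_counter] at hp'
      obtain ⟨a, ha, rfl⟩ := List.mem_map.mp hp'
      rw [PySem.Set.mem_ofList] at ha
      rw [beq_iff_eq, pv_get?_counter, if_pos (hp.mem_iff.mp ha), hc a]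
    · intro p hp'
      rw [PySem.Dict.items_counter] at hp'
      obtain ⟨a, ha, rfl⟩ := List.mem_map.mp hp'
      rw [PySem.Set.mem_ofList] at ha
      rw [PySem.Dict.contains_counter]
      simpa using hp.mem_iff.mpr ha

-- sorted(xs) == sorted(ys) ↔ the same multiset equality
theorem pv_sorted_eq_iff (xs ys : List (List Int)) :
    (pvSortedLL xs == pvSortedLL ys) = true ↔ xs.Perm ys := by
  rw [beq_iff_eq]; exact PySem.List.sorted_id_eq_sorted_id_iff_perm xs ys

-- B's per-line loop computes exactly A's per-line comprehension
theorem pv_line_step (nl : List String) (d : PySem.Dict (List Int) Int) (line : String) :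
    (let r := pvLineLoop (pvBuildPos nl) (pvSplit line "->") []
     if r.2 then d.insert r.1 (d.getD r.1 0 + 1) else d)
    = ((pvParseLine nl line).map (fun l => d.insert l (d.getD l 0 + 1))).getD d := by
  have hfun : (fun s => (pvBuildPos nl).get? (pvKey s))
      = (fun s => (PySem.List.index? nl (pvKey s)).map (fun (j : Nat) => (j : Int))) := by
    funext s; exact pv_get?_buildPos nl (pvKey s)
  cases hm : pvParseLine nl line with
  | some l =>
    have hm' : (pvSplit line "->").mapM (fun s => (pvBuildPos nl).get? (pvKey s)) = some l := by
      rw [hfun]; exact hm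
    simp only
    rw [pv_lineLoop_some (pvBuildPos nl) _ l [] hm']
    simp
  | none =>
    have hm' : (pvSplit line "->").mapM (fun s => (pvBuildPos nl).get? (pvKey s)) = none := by
      rw [hfun]; exact hm
    simp only
    rw [pv_lineLoop_none (pvBuildPos nl) _ [] hm']
    simp

-- ===== VERDICT (by name: the statement is the Claim_ definition above) =====
theorem validate_ce_path_spec : Claim_equal_validate_ce_path := by
  intro nl c2e ea _hdom
  unfold Spec_validate_ce_path validate_ce_path validate_ce_path_alt
  simp only
  have hext := pv_fold_extract (pvParseLine nl) (fun d l => d.insert l (d.getD l 0 + 1))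
      (fun acc p => match pvParseLine nl p with | some l => acc ++ [l] | none => acc)
      (fun d line =>
        let r := pvLineLoop (pvBuildPos nl) (pvSplit line "->") []
        if r.2 then d.insert r.1 (d.getD r.1 0 + 1) else d)
      (fun a p => by cases h : pvParseLine nl p <;> simp [h])
      (fun d line => pv_line_step nl d line)
      (pvSplit ea "\n") [] PySem.Dict.empty
  simp only [List.foldl_nil] at hext
  rw [← hext]
  rw [PySem.Dict.foldl_insert_getD_add_one_eq_counter, pv_exp_counter, pv_c2e_flat]
  by_cases hp : ((pvSplit ea "\n").foldl (fun acc p =>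
      match pvParseLine nl p with
      | some l => acc ++ [l]
      | none => acc) ([] : List (List Int))).Perm c2e.flatten
  · rw [if_pos ((pv_sorted_eq_iff _ _).mpr hp), ((pv_dictEq_counter _ _).mpr hp).symm]
  · rw [if_neg (fun h => hp ((pv_sorted_eq_iff _ _).mp (by simpa using h)))]
    exact ((Bool.not_eq_true _).mp (fun h => hp ((pv_dictEq_counter _ _).mp h))).symm
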